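-- pv_equiv track=rewrite | github.com/anCode1143/Neetcode150 | Greedy/numSubSeq.py | numOfSubsequences
-- ===== SOURCE A (Python) =====
-- def numOfSubsequences(s: str) -> int:
--     # count if L is at front
--     # count if T at end
--     # find optimal C position by keping track of Ls and Ts
--         # increment Ls and decrement Ts
--     tAmount = s.count("T")
--     optimalC = [0, 0]
--     currLs = 0
--     currTs = tAmount
--     for index in range(len(s)):
--         if s[index] == "L":
--             currLs += 1
--         if optimalC[1] < currLs*currTs:
--             optimalC[0] = index+1
--             optimalC[1] = currLs*currTs
--         if s[index] == "T":
--             currTs -= 1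
--
--     def LCTSubsequences(string):
--         l = 0
--         lc = 0
--         lct = 0
--         for char in string:
--             if char == 'L':
--                 l += 1
--             if char == "C":
--                 lc += l
--             if char == "T":
--                 lct += lc
--         return lct
--
--     appendL = LCTSubsequences("L"+s)
--     appendT = LCTSubsequences(s+"T")
--     appendC = LCTSubsequences(s[:optimalC[0]] + "C" + s[optimalC[0]:])
--     return max(appendL, appendC, appendT)
-- ===== SOURCE B (Python) =====
-- def numOfSubsequences(s: str) -> int:
--     # One pass: base LCT count plus the best single-insertion gain.
--     # gain for prepending 'L'  = number of "CT" subsequences (ct)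
--     # gain for appending 'T'   = number of "LC" subsequences (lc)
--     # gain for best 'C' insert = max over split points of (L's before) * (T's after)
--     ts = s.count("T")
--     l = lc = lct = 0
--     c = ct = 0
--     best = 0
--     for ch in s:
--         if ch == 'L':
--             l += 1
--         elif ch == 'C':
--             c += 1
--             lc += l
--         elif ch == 'T':
--             ts -= 1
--             ct += c
--             lct += lc
--         if best < l * ts:
--             best = l * ts
--     return lct + max(ct, best, lc)
-- ===== Notes on version B (the rewrite author's own statement) =====
-- stated objective: faster
-- what changed: Instead of building three modified strings and recounting LCT subsequences in each, B makes one pass computing the base LCT count together with the three insertion gains (CT-count for a front L, LC-count for a back T, max prefix-L x suffix-T for a C) and returns base + max of the gains.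
import Mathlib
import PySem

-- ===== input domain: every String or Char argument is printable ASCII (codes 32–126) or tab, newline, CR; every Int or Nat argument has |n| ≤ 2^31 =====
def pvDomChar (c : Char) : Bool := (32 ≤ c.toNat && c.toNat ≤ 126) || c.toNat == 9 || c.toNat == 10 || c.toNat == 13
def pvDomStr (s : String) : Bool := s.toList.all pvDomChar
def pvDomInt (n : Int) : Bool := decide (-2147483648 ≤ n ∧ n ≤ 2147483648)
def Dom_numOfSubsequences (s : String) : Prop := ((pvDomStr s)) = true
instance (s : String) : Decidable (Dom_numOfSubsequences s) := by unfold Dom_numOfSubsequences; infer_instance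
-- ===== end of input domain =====

-- B replaces A's build-three-strings-and-recount strategy by one pass computing the base
-- LCT count together with the three insertion gains, returning base + max(gains).

-- ===== PORT A =====
-- step of A's optimal-C scan (index lookup s[index]; indices come from range(len(s)), always in range, so pyGetD's default is never used)
def pvStepScanA (xs : List Char) (acc : (Int × Int) × Int × Int) (index : Int) : (Int × Int) × Int × Int :=
  let p := acc.1.1
  let best := acc.1.2
  let currLs0 := acc.2.1
  let currTs := acc.2.2
  let c := PySem.List.pyGetD xs index ' '
  let currLs := if c = 'L' then currLs0 + 1 else currLs0
  let pb := if best < currLs * currTs then (index + 1, currLs * currTs) else (p, best)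
  (pb, currLs, if c = 'T' then currTs - 1 else currTs)

-- the nested helper LCTSubsequences, char loop with accumulators (l, lc, lct)
def pvLCTSubsequencesA (cs : List Char) : Int :=
  (cs.foldl (fun (acc : Int × Int × Int) ch =>
      let l := if ch = 'L' then acc.1 + 1 else acc.1
      let lc := if ch = 'C' then acc.2.1 + l else acc.2.1
      let lct := if ch = 'T' then acc.2.2 + lc else acc.2.2
      (l, lc, lct)) (0, 0, 0)).2.2

def numOfSubsequences (s : String) : Int :=
  let tAmount : Int := (PySem.Str.count s "T" : Int)
  let st := (PySem.List.pyRange 0 (PySem.Str.len s) 1).foldl (pvStepScanA s.toList) ((0, 0), 0, tAmount)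
  let appendL := pvLCTSubsequencesA ('L' :: s.toList)
  let appendT := pvLCTSubsequencesA (s.toList ++ ['T'])
  let appendC := pvLCTSubsequencesA (PySem.List.slice s.toList none (some st.1.1) ++ 'C' :: PySem.List.slice s.toList (some st.1.1) none)
  max appendL (max appendC appendT)

-- ===== PORT B =====
-- B's single-pass step: state (l, lc, lct, c, ct, ts, best)
def pvStepB (acc : Int × Int × Int × Int × Int × Int × Int) (ch : Char) : Int × Int × Int × Int × Int × Int × Int :=
  let (l, lc, lct, c, ct, ts, best) := acc
  let (l, lc, lct, c, ct, ts) :=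
    if ch = 'L' then (l + 1, lc, lct, c, ct, ts)
    else if ch = 'C' then (l, lc + l, lct, c + 1, ct, ts)
    else if ch = 'T' then (l, lc, lct + lc, c, ct + c, ts - 1)
    else (l, lc, lct, c, ct, ts)
  if best < l * ts then (l, lc, lct, c, ct, ts, l * ts) else (l, lc, lct, c, ct, ts, best)

def numOfSubsequences_alt (s : String) : Int :=
  let ts : Int := (PySem.Str.count s "T" : Int)
  let st := s.toList.foldl pvStepB (0, 0, 0, 0, 0, ts, 0)
  let lc := st.2.1
  let lct := st.2.2.1
  let ct := st.2.2.2.2.1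
  let best := st.2.2.2.2.2.2
  lct + max ct (max best lc)

-- ===== PRECONDITION & SPEC =====
def Spec_numOfSubsequences (s : String) (out : Int) : Prop := out = numOfSubsequences_alt s
instance (s : String) (out : Int) : Decidable (Spec_numOfSubsequences s out) := by unfold Spec_numOfSubsequences; infer_instance

-- ===== CLAIM (what is proved, stated in full; the proofs are below) =====
def Claim_equal_numOfSubsequences : Prop := ∀ (s : String), Dom_numOfSubsequences s → Spec_numOfSubsequences s (numOfSubsequences s)

-- ===== LEMMAS AND PROOFS =====

-- character-count and subsequence-count functions used to characterise both folds
def pvNL : List Char → Int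
  | [] => 0
  | c :: cs => (if c = 'L' then 1 else 0) + pvNL cs
def pvNC : List Char → Int
  | [] => 0
  | c :: cs => (if c = 'C' then 1 else 0) + pvNC cs
def pvNT : List Char → Int
  | [] => 0
  | c :: cs => (if c = 'T' then 1 else 0) + pvNT cs
def pvLC : List Char → Int
  | [] => 0
  | c :: cs => (if c = 'L' then pvNC cs else 0) + pvLC cs
def pvCT : List Char → Int
  | [] => 0
  | c :: cs => (if c = 'C' then pvNT cs else 0) + pvCT cs
def pvLCT : List Char → Int
  | [] => 0
  | c :: cs => (if c = 'L' then pvCT cs else 0) + pvLCT cs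

-- B's best accumulator, written as a recursion (spec of the best component of pvStepB)
def pvBF : List Char → Int → Int → Int → Int
  | [], _, _, best => best
  | c :: cs, l, t, best =>
    let l' := if c = 'L' then l + 1 else l
    let t' := if c = 'T' then t - 1 else t
    pvBF cs l' t' (if best < l' * t' then l' * t' else best)

theorem pvNL_nonneg (cs : List Char) : 0 ≤ pvNL cs := by
  induction cs with
  | nil => simp [pvNL]
  | cons c cs ih => simp only [pvNL]; split <;> omega

theorem pvNT_eq_count (cs : List Char) : pvNT cs = (cs.count 'T' : Int) := by
  induction cs with
  | nil => simp [pvNT]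
  | cons c cs ih => by_cases hc : c = 'T' <;> (simp [pvNT, hc, ih, eq_comm]; try omega)

-- single-character substring count is character count (fuel-indexed helper of PySem.Chars.count)
theorem pvCount_go_single (c : Char) : ∀ (cs : List Char) (acc : Nat),
    PySem.Chars.count.go [c] cs.length cs acc = acc + cs.count c := by
  intro cs
  induction cs with
  | nil => intro acc; simp [PySem.Chars.count.go]
  | cons h t ih =>
    intro acc
    simp only [List.length_cons, PySem.Chars.count.go, List.isPrefixOf, List.count_cons]
    by_cases hc : h = c
    · simp [hc, ih]; omega
    · simp [hc, ih]; exact fun e => hc e.symm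

theorem pvNT_count (s : String) : (PySem.Str.count s "T" : Int) = pvNT s.toList := by
  rw [PySem.Str.count_eq]
  unfold PySem.Chars.count
  have h := pvCount_go_single 'T' s.toList 0
  simp at h ⊢
  simp [h, pvNT_eq_count]

-- master characterisation of the LCT fold from an arbitrary state
theorem pvLct_fold (cs : List Char) (l lc lct : Int) :
    cs.foldl (fun (acc : Int × Int × Int) ch =>
      let l := if ch = 'L' then acc.1 + 1 else acc.1
      let lc := if ch = 'C' then acc.2.1 + l else acc.2.1
      let lct := if ch = 'T' then acc.2.2 + lc else acc.2.2
      (l, lc, lct)) (l, lc, lct)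
    = (l + pvNL cs, lc + l * pvNC cs + pvLC cs, lct + lc * pvNT cs + l * pvCT cs + pvLCT cs) := by
  induction cs generalizing l lc lct with
  | nil => simp [pvNL, pvNC, pvNT, pvLC, pvCT, pvLCT]
  | cons c cs ih =>
    simp only [List.foldl_cons, ih, pvNL, pvNC, pvNT, pvLC, pvCT, pvLCT]
    by_cases hL : c = 'L' <;> by_cases hC : c = 'C' <;> by_cases hT : c = 'T' <;>
      simp_all <;> (repeat' constructor) <;> (first | trivial | ring)

-- characterisation of B's fold
theorem pvB_fold (cs : List Char) (l lc lct c ct t best : Int) :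
    cs.foldl pvStepB (l, lc, lct, c, ct, t, best)
    = (l + pvNL cs, lc + l * pvNC cs + pvLC cs, lct + lc * pvNT cs + l * pvCT cs + pvLCT cs,
       c + pvNC cs, ct + c * pvNT cs + pvCT cs, t - pvNT cs, pvBF cs l t best) := by
  induction cs generalizing l lc lct c ct t best with
  | nil => simp [pvNL, pvNC, pvNT, pvLC, pvCT, pvLCT, pvBF]
  | cons ch cs ih =>
    simp only [List.foldl_cons, pvStepB, pvBF]
    by_cases hL : ch = 'L' <;> by_cases hC : ch = 'C' <;> by_cases hT : ch = 'T' <;>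
      simp_all [pvNL, pvNC, pvNT, pvLC, pvCT, pvLCT] <;>
      split <;> (repeat' constructor) <;> (first | trivial | ring)

theorem pvNL_append (a b : List Char) : pvNL (a ++ b) = pvNL a + pvNL b := by
  induction a with
  | nil => simp [pvNL]
  | cons c cs ih => simp [pvNL, ih]; ring

theorem pvStepScanA_eq (xs pre rs : List Char) (c : Char) (hxs : xs = pre ++ c :: rs)
    (p best l t : Int) :
    pvStepScanA xs ((p, best), l, t) (pre.length : Int) =
      ((if best < (if c = 'L' then l + 1 else l) * t
          then ((pre.length : Int) + 1, (if c = 'L' then l + 1 else l) * t) else (p, best)),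
        (if c = 'L' then l + 1 else l), if c = 'T' then t - 1 else t) := by
  have hget : PySem.List.pyGetD xs ((pre.length : Int)) ' ' = c := by rw [hxs]; simp [pysem]
  simp [pvStepScanA, hget]
theorem pvScanA_fold (xs : List Char) : ∀ (rest pre : List Char), xs = pre ++ rest →
    ∀ (p best : Int), pvNL pre * pvNT rest ≤ best →
    0 ≤ p → p.toNat ≤ pre.length →
    pvNL (xs.take p.toNat) * pvNT (xs.drop p.toNat) = best →
    ∃ q : Int,
      (PySem.List.enumerate rest (pre.length : Int)).foldl
          (fun acc ic => pvStepScanA xs acc ic.1) ((p, best), pvNL pre, pvNT rest)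
        = ((q, pvBF rest (pvNL pre) (pvNT rest) best), pvNL xs, 0) ∧
      0 ≤ q ∧ q.toNat ≤ xs.length ∧
      pvNL (xs.take q.toNat) * pvNT (xs.drop q.toNat) = pvBF rest (pvNL pre) (pvNT rest) best := by
  intro rest
  induction rest with
  | nil =>
    intro pre hxs p best hbl hp0 hplen hpval
    refine ⟨p, ?_, hp0, ?_, ?_⟩
    · simp [PySem.List.enumerate, pvNT, pvBF, hxs]
    · simp [hxs]; omega
    · simpa [pvBF] using hpval
  | cons c rs ih =>
    intro pre hxs p best hbl hp0 hplen hpval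
    rw [PySem.List.enumerate_cons, List.foldl_cons]
    have hxs' : xs = (pre ++ [c]) ++ rs := by simp [hxs]
    have hlen' : ((pre ++ [c]).length : Int) = (pre.length : Int) + 1 := by simp
    have hplen' : p.toNat ≤ (pre ++ [c]).length := by simp; omega
    have hNL' : pvNL (pre ++ [c]) = (if c = 'L' then pvNL pre + 1 else pvNL pre) := by
      rw [pvNL_append]; simp [pvNL]; split <;> ring
    have hLnn : 0 ≤ pvNL pre := pvNL_nonneg pre
    by_cases hcT : c = 'T'
    · subst hcT
      have hnotL : ¬ (('T' : Char) = 'L') := by decide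
      have hNT : pvNT ('T' :: rs) = 1 + pvNT rs := by simp [pvNT]
      have hNLT : pvNL (pre ++ ['T']) = pvNL pre := by rw [hNL', if_neg hnotL]
      have ht' : pvNT ('T' :: rs) - 1 = pvNT rs := by rw [hNT]; ring
      have hble : pvNL pre * pvNT rs ≤ best := by rw [hNT] at hbl; nlinarith
      have hnb : ¬ best < pvNL pre * pvNT ('T' :: rs) := not_lt.mpr hbl
      have hnb2 : ¬ best < pvNL pre * pvNT rs := not_lt.mpr hble
      have hstep2 : pvStepScanA xs ((p, best), pvNL pre, pvNT ('T' :: rs)) (pre.length : Int)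
          = ((p, best), pvNL pre, pvNT rs) := by
        rw [pvStepScanA_eq xs pre rs 'T' hxs]; simp [ht', hnb]
      simp only [hstep2]
      have hbl' : pvNL (pre ++ ['T']) * pvNT rs ≤ best := by rw [hNLT]; exact hble
      obtain ⟨q, hfold, hq0, hqlen, hqval⟩ := ih (pre ++ ['T']) hxs' p best hbl' hp0 hplen' hpval
      rw [hNLT, hlen'] at hfold
      rw [hNLT] at hqval
      have hbf : pvBF ('T' :: rs) (pvNL pre) (pvNT ('T' :: rs)) best
          = pvBF rs (pvNL pre) (pvNT rs) best := by
        simp [pvBF, ht', hnb2]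
      rw [hbf]
      exact ⟨q, hfold, hq0, hqlen, hqval⟩
    · have hNT : pvNT (c :: rs) = pvNT rs := by simp [pvNT, hcT]
      have hstep2 : pvStepScanA xs ((p, best), pvNL pre, pvNT (c :: rs)) (pre.length : Int)
          = ((if best < pvNL (pre ++ [c]) * pvNT rs
                then ((pre.length : Int) + 1, pvNL (pre ++ [c]) * pvNT rs) else (p, best)),
              pvNL (pre ++ [c]), pvNT rs) := by
        rw [pvStepScanA_eq xs pre rs c hxs, if_neg hcT, hNT, ← hNL']
      have hbf : pvBF (c :: rs) (pvNL pre) (pvNT (c :: rs)) best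
          = pvBF rs (pvNL (pre ++ [c])) (pvNT rs)
              (if best < pvNL (pre ++ [c]) * pvNT rs then pvNL (pre ++ [c]) * pvNT rs else best) := by
        simp only [pvBF]
        rw [if_neg hcT, hNT, ← hNL']
      by_cases hup : best < pvNL (pre ++ [c]) * pvNT rs
      · rw [if_pos hup] at hstep2
        simp only [hstep2]
        have hval' : pvNL (xs.take ((pre.length : Int) + 1).toNat) * pvNT (xs.drop ((pre.length : Int) + 1).toNat)
            = pvNL (pre ++ [c]) * pvNT rs := by
          rw [show ((pre.length : Int) + 1).toNat = (pre ++ [c]).length by simp]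
          rw [hxs', List.take_left' rfl, List.drop_left' rfl]
        obtain ⟨q, hfold, hq0, hqlen, hqval⟩ := ih (pre ++ [c]) hxs'
          ((pre.length : Int) + 1) (pvNL (pre ++ [c]) * pvNT rs) le_rfl (by omega)
          (by simp) hval'
        rw [hlen'] at hfold
        rw [hbf, if_pos hup]
        exact ⟨q, hfold, hq0, hqlen, hqval⟩
      · rw [if_neg hup] at hstep2
        simp only [hstep2]
        obtain ⟨q, hfold, hq0, hqlen, hqval⟩ := ih (pre ++ [c]) hxs' p best (not_lt.mp hup) hp0 hplen' hpval
        rw [hlen'] at hfold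
        rw [hbf, if_neg hup]
        exact ⟨q, hfold, hq0, hqlen, hqval⟩
theorem pvLCT_split (a b : List Char) :
    pvLCT (a ++ b) = pvLCT a + pvLC a * pvNT b + pvNL a * pvCT b + pvLCT b := by
  have h1 := pvLct_fold (a ++ b) 0 0 0
  rw [List.foldl_append, pvLct_fold a 0 0 0, pvLct_fold b] at h1
  have h2 := congrArg (fun x : Int × Int × Int => x.2.2) h1
  simp at h2
  linarith [h2]

theorem pvLCT_appendL (cs : List Char) :
    pvLCTSubsequencesA ('L' :: cs) = pvLCT cs + pvCT cs := by
  unfold pvLCTSubsequencesA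
  rw [show ('L' :: cs) = ['L'] ++ cs from rfl, List.foldl_append,
    pvLct_fold ['L'] 0 0 0, pvLct_fold cs]
  norm_num [pvNL, pvNC, pvNT, pvLC, pvCT, pvLCT]
  ring

theorem pvLCT_appendT (cs : List Char) :
    pvLCTSubsequencesA (cs ++ ['T']) = pvLCT cs + pvLC cs := by
  unfold pvLCTSubsequencesA
  rw [List.foldl_append, pvLct_fold cs 0 0 0, List.foldl_cons]
  simp

theorem pvLCT_insertC (t d : List Char) :
    pvLCTSubsequencesA (t ++ 'C' :: d) = pvLCT (t ++ d) + pvNL t * pvNT d := by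
  unfold pvLCTSubsequencesA
  rw [show (t ++ 'C' :: d) = t ++ (['C'] ++ d) by simp, List.foldl_append, List.foldl_append,
    pvLct_fold t 0 0 0, pvLct_fold ['C'], pvLct_fold d]
  norm_num [pvNL, pvNC, pvNT, pvLC, pvCT, pvLCT,
    show ('C' : Char) ≠ 'T' from by decide, show ('C' : Char) ≠ 'L' from by decide]
  linear_combination -pvLCT_split t d

theorem numOfSubsequences_spec : Claim_equal_numOfSubsequences := by
  intro s _
  show Spec_numOfSubsequences s (numOfSubsequences s)
  unfold Spec_numOfSubsequences numOfSubsequences numOfSubsequences_alt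
  simp only [pvNT_count s, PySem.Str.len_eq]
  obtain ⟨q, hfold, hq0, hqlen, hqval⟩ := pvScanA_fold s.toList s.toList [] rfl 0 0
    (by simp [pvNL]) le_rfl (by simp) (by simp [pvNL])
  simp only [pvNL] at hfold hqval
  rw [show ((([] : List Char).length : Int)) = 0 by simp] at hfold
  have hfoldeq : (PySem.List.pyRange 0 (s.toList.length : Int) 1).foldl (pvStepScanA s.toList)
        ((0, 0), 0, pvNT s.toList)
      = ((q, pvBF s.toList 0 (pvNT s.toList) 0), pvNL s.toList, 0) := by
    rw [PySem.List.enumerate_eq_map_pyRange s.toList ' ', List.foldl_map] at hfold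
    simpa [PySem.List.len] using hfold
  rw [hfoldeq]
  norm_num
  rw [PySem.List.slice_to s.toList hq0, PySem.List.slice_from s.toList hq0,
    pvLCT_appendL, pvLCT_appendT, pvLCT_insertC, List.take_append_drop, hqval,
    pvB_fold]
  norm_num
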